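-- pv_equiv track=rewrite | github.com/mrkirby153/AdventOfCode2022 | day09/day09.py | should_move_tail
-- ===== SOURCE A (Python) =====
-- def should_move_tail(head_position, tail_position):
--     hx, hy = head_position
--     tx, ty = tail_position
--
--     for dx in range(-1, 2):
--         for dy in range(-1, 2):
--             # dprint(f"{tx+dx}, {hy+dy}")
--             if tx+dx == hx and ty+dy == hy:
--                 return False
--     return True
-- ===== SOURCE B (Python) =====
-- def should_move_tail(head_position, tail_position):
--     hx, hy = head_position
--     tx, ty = tail_position
--     return max(abs(hx - tx), abs(hy - ty)) > 1
-- ===== Notes on version B (the rewrite author's own statement) =====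
-- stated objective: idiomatic
-- what changed: Replaced the 3x3 nested neighbor enumeration with a closed-form Chebyshev distance test max(|hx-tx|,|hy-ty|) > 1.
import Mathlib
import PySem

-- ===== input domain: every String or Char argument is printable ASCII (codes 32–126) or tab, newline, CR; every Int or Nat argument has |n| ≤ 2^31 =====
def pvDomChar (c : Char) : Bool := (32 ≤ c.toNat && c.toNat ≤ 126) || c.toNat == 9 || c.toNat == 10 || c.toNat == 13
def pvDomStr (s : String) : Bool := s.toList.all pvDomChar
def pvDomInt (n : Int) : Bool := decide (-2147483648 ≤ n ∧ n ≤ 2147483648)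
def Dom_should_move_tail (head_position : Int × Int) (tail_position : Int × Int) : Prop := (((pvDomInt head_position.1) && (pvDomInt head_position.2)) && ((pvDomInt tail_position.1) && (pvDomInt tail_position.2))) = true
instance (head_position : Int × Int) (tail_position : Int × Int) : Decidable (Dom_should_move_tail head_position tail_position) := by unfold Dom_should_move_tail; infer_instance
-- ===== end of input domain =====

-- ===== PORT A =====
-- B replaces A's 3x3 neighbor enumeration with a closed-form Chebyshev distance test (idiomatic).
def should_move_tail (head_position : Int × Int) (tail_position : Int × Int) : Bool :=
  let hx := head_position.1
  let hy := head_position.2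
  let tx := tail_position.1
  let ty := tail_position.2
  !((PySem.List.pyRange (-1) 2 1).any (fun dx =>
      (PySem.List.pyRange (-1) 2 1).any (fun dy =>
        decide (tx + dx = hx) && decide (ty + dy = hy))))

-- ===== PORT B =====
def should_move_tail_alt (head_position : Int × Int) (tail_position : Int × Int) : Bool :=
  let hx := head_position.1
  let hy := head_position.2
  let tx := tail_position.1
  let ty := tail_position.2
  decide (max (hx - tx).natAbs (hy - ty).natAbs > 1)

-- ===== PRECONDITION & SPEC =====
def Spec_should_move_tail (head_position : Int × Int) (tail_position : Int × Int) (out : Bool) : Prop := out = should_move_tail_alt head_position tail_position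
instance (head_position : Int × Int) (tail_position : Int × Int) (out : Bool) : Decidable (Spec_should_move_tail head_position tail_position out) := by unfold Spec_should_move_tail; infer_instance

-- ===== CLAIM (what is proved, stated in full; the proofs are below) =====
def Claim_equal_should_move_tail : Prop := ∀ (head_position : Int × Int) (tail_position : Int × Int), Dom_should_move_tail head_position tail_position → Spec_should_move_tail head_position tail_position (should_move_tail head_position tail_position)

-- ===== LEMMAS AND PROOFS =====

-- ===== VERDICT (by name: the statement is the Claim_ definition above) =====
theorem should_move_tail_spec : Claim_equal_should_move_tail := by
  intro ⟨hx, hy⟩ ⟨tx, ty⟩ _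
  unfold Spec_should_move_tail should_move_tail should_move_tail_alt
  have hr : PySem.List.pyRange (-1) 2 1 = [-1, 0, 1] := by decide
  simp only [hr, List.any_cons, List.any_nil, Bool.or_false,
    ← Bool.decide_and, ← Bool.decide_or]
  rw [← decide_not, decide_eq_decide]
  omega
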